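-- pv_equiv track=rewrite | github.com/logenBupt/bert_pytorch | L1/process_fn.py | valid_sentence
-- ===== SOURCE A (Python) =====
-- def valid_sentence(sent):
--     if len(sent) < 4:
--         return False
--
--     if (
--         # '>' in sent
--         '/' in sent
--         or '<' in sent
--         or '{' in sent
--         or '}' in sent
--         # or '-' in sent
--         or '+' in sent
--         or '=' in sent
--         or '*' in sent
--         or '@' in sent
--         # or ':' in sent
--         ) :
--         return False
--
--     num_count = sum(c.isdigit() for c in sent)
--     num_space = sent.count(' ')
--     num_co = sent.count(',')
--     num_da = sent.count('-')
--     num_q = sent.count('?')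
--     num_a = sent.count('>')
--
--     if (num_count + num_space + num_co + num_da + num_q + num_a)> len(sent) / 3:
--         return False
--
--     if ("log" in sent
--         or "comment" in sent
--         or 'http' in sent
--         or '.com' in sent
--         or 'contact' in sent
--         or 'loading' in sent ):
--
--         return False
--
--     return True
-- ===== SOURCE B (Python) =====
-- _WORDS = ("log", "comment", "http", ".com", "contact", "loading")
-- _FORBID = frozenset("/<{}+=*@")
-- _COUNTED = frozenset(" ,-?>")
--
-- def valid_sentence(sent):
--     # One position-by-position scan doing everything: early-abort on a forbidden
--     # character or on a forbidden word starting at the current position (multi-pattern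
--     # prefix matching instead of builtin substring scans), accumulating the count.
--     if len(sent) < 4:
--         return False
--     cnt = 0
--     for i, c in enumerate(sent):
--         if c in _FORBID:
--             return False
--         for w in _WORDS:
--             if sent.startswith(w, i):
--                 return False
--         if c.isdigit() or c in _COUNTED:
--             cnt += 1
--     return not cnt > len(sent) / 3
-- ===== Notes on version B (the rewrite author's own statement) =====
-- stated objective: alternative
-- what changed: Replaced A's fifteen independent builtin scans (seven counting passes, eight single-char and six word substring tests) by a single position-by-position scan that early-aborts on a forbidden character or on a forbidden word matched by prefix at the current position (naive multi-pattern matching), accumulating the combined count along the way.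
import Mathlib
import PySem

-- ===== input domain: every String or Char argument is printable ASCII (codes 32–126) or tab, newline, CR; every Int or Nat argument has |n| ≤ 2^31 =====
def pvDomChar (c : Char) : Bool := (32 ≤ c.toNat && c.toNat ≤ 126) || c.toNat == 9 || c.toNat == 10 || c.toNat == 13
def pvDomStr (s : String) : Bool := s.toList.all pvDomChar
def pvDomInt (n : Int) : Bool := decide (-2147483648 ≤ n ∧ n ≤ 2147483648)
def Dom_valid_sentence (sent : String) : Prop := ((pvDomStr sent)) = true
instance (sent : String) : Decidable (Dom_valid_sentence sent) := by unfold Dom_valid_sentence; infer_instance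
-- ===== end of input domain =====

-- B replaces A's fifteen independent builtin scans by one position-by-position scan that
-- early-aborts on a forbidden character or a forbidden word matched by prefix at the
-- current position, accumulating the combined count; same values everywhere.


-- ===== PORT A =====
-- 'x > len/3' (float division) is ported as '3*x > len': exact, since x is an integer and
-- len/3 is either an exactly representable integer or at distance ≥ 1/3 from every integer.
def valid_sentence (sent : String) : Bool :=
  if PySem.Str.len sent < 4 then false
  else if PySem.Str.isIn "/" sent || PySem.Str.isIn "<" sent || PySem.Str.isIn "{" sent ||
          PySem.Str.isIn "}" sent || PySem.Str.isIn "+" sent || PySem.Str.isIn "=" sent ||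
          PySem.Str.isIn "*" sent || PySem.Str.isIn "@" sent then false
  else
    let num_count := (sent.toList.map (fun c => if PySem.Str.isdigit c then (1:Nat) else 0)).sum
    let num_space := PySem.Str.count sent " "
    let num_co := PySem.Str.count sent ","
    let num_da := PySem.Str.count sent "-"
    let num_q := PySem.Str.count sent "?"
    let num_a := PySem.Str.count sent ">"
    if (3 : Int) * (num_count + num_space + num_co + num_da + num_q + num_a) > PySem.Str.len sent then false
    else if PySem.Str.isIn "log" sent || PySem.Str.isIn "comment" sent || PySem.Str.isIn "http" sent ||
            PySem.Str.isIn ".com" sent || PySem.Str.isIn "contact" sent || PySem.Str.isIn "loading" sent then false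
    else true

-- ===== PORT B =====
def pvForbid (c : Char) : Bool :=
  c == '/' || c == '<' || c == '{' || c == '}' || c == '+' || c == '=' || c == '*' || c == '@'
def pvCounted (c : Char) : Bool :=
  PySem.Str.isdigit c || c == ' ' || c == ',' || c == '-' || c == '?' || c == '>'
def pvWords : List (List Char) :=
  ["log".toList, "comment".toList, "http".toList, ".com".toList, "contact".toList, "loading".toList]

-- Source B's scan loop: early-exit 'return False' becomes 'none', the count is threaded through
def pvScan : List Char → Nat → Option Nat
  | [], cnt => some cnt
  | c :: t, cnt =>
    if pvForbid c then none
    else if pvWords.any (fun w => w.isPrefixOf (c :: t)) then none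
    else pvScan t (cnt + if pvCounted c then 1 else 0)

-- 'not cnt > len/3' (float division) ported as '!(3*cnt > len)': exact (see Port A note)
def valid_sentence_alt (sent : String) : Bool :=
  let cs := sent.toList
  if cs.length < 4 then false
  else
    match pvScan cs 0 with
    | none => false
    | some cnt => !((3 : Int) * cnt > (cs.length : Int))

-- ===== PRECONDITION & SPEC =====
def Spec_valid_sentence (sent : String) (out : Bool) : Prop := out = valid_sentence_alt sent
instance (sent : String) (out : Bool) : Decidable (Spec_valid_sentence sent out) := by unfold Spec_valid_sentence; infer_instance

-- ===== CLAIM (what is proved, stated in full; the proofs are below) =====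
def Claim_equal_valid_sentence : Prop := ∀ (sent : String), Dom_valid_sentence sent → Spec_valid_sentence sent (valid_sentence sent)

-- ===== LEMMAS AND PROOFS =====

-- counting a single-character substring is counting that character
theorem count_go_singleton (c : Char) (l : List Char) (fuel acc : Nat) (h : l.length ≤ fuel) :
    PySem.Chars.count.go [c] fuel l acc = acc + l.countP (· == c) := by
  induction l generalizing fuel acc with
  | nil => cases fuel <;> simp [PySem.Chars.count.go]
  | cons a t ih =>
    cases fuel with
    | zero => simp at h
    | succ f =>
      by_cases hc : c = a
      · subst hc
        simp only [PySem.Chars.count.go, List.isPrefixOf, beq_self_eq_true, Bool.true_and,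
          if_true, List.length_singleton, List.drop_succ_cons,
          List.drop_zero, List.countP_cons]
        rw [ih f (acc + 1) (by simpa using h)]
        omega
      · have hb : (c == a) = false := by simp [hc]
        simp only [PySem.Chars.count.go, List.isPrefixOf, hb, Bool.false_and,
          Bool.false_eq_true, if_false, List.countP_cons]
        rw [ih f acc (by simpa using h)]
        have : (a == c) = false := by simp [Ne.symm hc]
        simp [this]

theorem count_singleton (s : List Char) (c : Char) :
    PySem.Chars.count s [c] = s.countP (· == c) := by
  simpa using count_go_singleton c s s.length 0 le_rfl

-- a single-character substring test is a character membership test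
theorem isIn_singleton (c : Char) (l : List Char) :
    PySem.Chars.isIn [c] l = l.any (· == c) := by
  by_cases hm : c ∈ l
  · rw [(PySem.Chars.isIn_iff_infix [c] l).2 ((List.singleton_infix_iff c l).2 hm)]
    symm
    simp only [List.any_eq_true]
    exact ⟨c, hm, by simp⟩
  · rw [(PySem.Chars.isIn_eq_false_iff [c] l).2 (by rw [List.singleton_infix_iff]; exact hm)]
    symm
    simp only [List.any_eq_false]
    intro x hx
    simp only [beq_iff_eq]
    rintro rfl
    exact hm hx

-- per-character: the combined indicator is the sum of the six disjoint indicators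
theorem ind_split (a : Char) :
    (if pvCounted a then (1:Nat) else 0)
    = (if PySem.Str.isdigit a then 1 else 0) + (if a == ' ' then 1 else 0)
      + (if a == ',' then 1 else 0) + (if a == '-' then 1 else 0)
      + (if a == '?' then 1 else 0) + (if a == '>' then 1 else 0) := by
  have he : ∀ d : Char, a = d ↔ a.toNat = d.toNat := by
    intro d
    constructor
    · rintro rfl; rfl
    · intro h; exact Char.ext (by simpa [Char.toNat] using (UInt32.toNat_inj).1 h)
  simp only [pvCounted, Bool.or_eq_true, beq_iff_eq]
  split_ifs with h0 h1 h2 h3 h4 h5 h6 <;>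
    simp_all [he ' ', he ',', he '-', he '?', he '>',
      show (' ').toNat = 32 from rfl, show (',').toNat = 44 from rfl,
      show ('-').toNat = 45 from rfl, show ('?').toNat = 63 from rfl,
      show ('>').toNat = 62 from rfl] <;> revert h1 <;> decide

-- the combined-indicator count splits into the six disjoint counts
theorem countP_split (l : List Char) :
    l.countP pvCounted
    = l.countP PySem.Str.isdigit + l.countP (· == ' ') + l.countP (· == ',')
      + l.countP (· == '-') + l.countP (· == '?') + l.countP (· == '>') := by
  induction l with
  | nil => simp
  | cons a t ih =>
    simp only [List.countP_cons, ih]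
    have := ind_split a
    split_ifs at this ⊢ <;> omega

-- OR of the eight per-character membership tests is one any-test
theorem any_split (l : List Char) :
    (l.any (· == '/') || l.any (· == '<') || l.any (· == '{') || l.any (· == '}') ||
     l.any (· == '+') || l.any (· == '=') || l.any (· == '*') || l.any (· == '@'))
    = l.any pvForbid := by
  induction l with
  | nil => simp
  | cons a t ih =>
    simp only [List.any_cons, ← ih, pvForbid]
    cases h1 : (a == '/') <;> cases h2 : (a == '<') <;> cases h3 : (a == '{') <;>
      cases h4 : (a == '}') <;> cases h5 : (a == '+') <;> cases h6 : (a == '=') <;>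
      cases h7 : (a == '*') <;> cases h8 : (a == '@') <;> simp

-- 'w occurs somewhere in l': w is a prefix of some nonempty suffix
def pvOccurs (w : List Char) : List Char → Bool
  | [] => false
  | c :: t => w.isPrefixOf (c :: t) || pvOccurs w t

theorem any_or {α : Type} (l : List α) (p q : α → Bool) :
    l.any (fun x => p x || q x) = (l.any p || l.any q) := by
  induction l with
  | nil => rfl
  | cons a t ih => simp only [List.any_cons, ih]; cases p a <;> cases q a <;> simp

-- the scan computes 'abort iff forbidden char or word occurrence; else the full count'
theorem scan_eq (l : List Char) (cnt : Nat) :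
    pvScan l cnt
    = if l.any pvForbid || pvWords.any (fun w => pvOccurs w l) then none
      else some (cnt + l.countP pvCounted) := by
  induction l generalizing cnt with
  | nil => simp [pvScan, pvOccurs]
  | cons c t ih =>
    simp only [pvScan, List.any_cons,
      show (fun w => pvOccurs w (c :: t)) = (fun w => w.isPrefixOf (c :: t) || pvOccurs w t)
        from by funext w; rfl,
      any_or]
    by_cases hF : pvForbid c
    · simp [hF]
    · by_cases hW : pvWords.any (fun w => w.isPrefixOf (c :: t))
      · simp [hF, hW]
      · simp only [hF, hW, Bool.false_or, ih, List.countP_cons]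
        split_ifs <;> first | rfl | (congr 1; omega) | simp_all

-- occurrence by prefix matching coincides with Python's substring test (nonempty pattern)
theorem occurs_eq_isIn (w l : List Char) (hw : w ≠ []) :
    pvOccurs w l = PySem.Chars.isIn w l := by
  rw [Bool.eq_iff_iff, PySem.Chars.isIn_iff_infix]
  induction l with
  | nil => simp [pvOccurs, hw, List.infix_iff_prefix_suffix]
  | cons c t ih =>
    simp [pvOccurs, List.infix_cons_iff, ih, List.isPrefixOf_iff_prefix]

-- ===== VERDICT (by name: the statement is the Claim_ definition above) =====
theorem valid_sentence_spec : Claim_equal_valid_sentence := by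
  intro sent _
  unfold Spec_valid_sentence valid_sentence valid_sentence_alt
  simp only [scan_eq, PySem.Str.isIn, PySem.Str.count, PySem.Str.len]
  simp only [show ("/" : String).toList = ['/'] from by decide,
      show ("<" : String).toList = ['<'] from by decide,
      show ("{" : String).toList = ['{'] from by decide,
      show ("}" : String).toList = ['}'] from by decide,
      show ("+" : String).toList = ['+'] from by decide,
      show ("=" : String).toList = ['='] from by decide,
      show ("*" : String).toList = ['*'] from by decide,
      show ("@" : String).toList = ['@'] from by decide,
      show (" " : String).toList = [' '] from by decide,
      show ("," : String).toList = [','] from by decide,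
      show ("-" : String).toList = ['-'] from by decide,
      show ("?" : String).toList = ['?'] from by decide,
      show (">" : String).toList = ['>'] from by decide,
      count_singleton, isIn_singleton, any_split, PySem.List.sum_map_ite_one_zero_nat]
  have hwords : (pvWords.any fun w => pvOccurs w sent.toList)
      = (PySem.Chars.isIn "log".toList sent.toList || PySem.Chars.isIn "comment".toList sent.toList ||
         PySem.Chars.isIn "http".toList sent.toList || PySem.Chars.isIn ".com".toList sent.toList ||
         PySem.Chars.isIn "contact".toList sent.toList || PySem.Chars.isIn "loading".toList sent.toList) := by
    simp only [pvWords, List.any_cons, List.any_nil,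
      occurs_eq_isIn _ _ (by decide : ("log".toList : List Char) ≠ []),
      occurs_eq_isIn _ _ (by decide : ("comment".toList : List Char) ≠ []),
      occurs_eq_isIn _ _ (by decide : ("http".toList : List Char) ≠ []),
      occurs_eq_isIn _ _ (by decide : (".com".toList : List Char) ≠ []),
      occurs_eq_isIn _ _ (by decide : ("contact".toList : List Char) ≠ []),
      occurs_eq_isIn _ _ (by decide : ("loading".toList : List Char) ≠ []),
      Bool.or_false, Bool.or_assoc]
  rw [hwords]
  have hnum : (3 : Int) * ((sent.toList.countP PySem.Str.isdigit : Int)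
        + (sent.toList.countP (· == ' ') : Int) + (sent.toList.countP (· == ',') : Int)
        + (sent.toList.countP (· == '-') : Int) + (sent.toList.countP (· == '?') : Int)
        + (sent.toList.countP (· == '>') : Int))
      = 3 * (sent.toList.countP pvCounted : Int) := by
    rw [countP_split]; push_cast; ring
  rw [hnum]
  simp only [Nat.zero_add]
  by_cases h4 : sent.toList.length < 4
  · rw [if_pos h4, if_pos (show ((sent.toList.length : Int) < 4) from by exact_mod_cast h4)]
  · rw [if_neg h4, if_neg (show ¬ ((sent.toList.length : Int) < 4) from by exact_mod_cast h4)]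
    by_cases hF : sent.toList.any pvForbid = true
    · rw [if_pos hF, if_pos (show (sent.toList.any pvForbid ||
          (PySem.Chars.isIn "log".toList sent.toList || PySem.Chars.isIn "comment".toList sent.toList ||
           PySem.Chars.isIn "http".toList sent.toList || PySem.Chars.isIn ".com".toList sent.toList ||
           PySem.Chars.isIn "contact".toList sent.toList || PySem.Chars.isIn "loading".toList sent.toList)) = true
          from by simp only [hF, Bool.true_or])]
    · rw [if_neg hF]
      by_cases hW : (PySem.Chars.isIn "log".toList sent.toList || PySem.Chars.isIn "comment".toList sent.toList ||
           PySem.Chars.isIn "http".toList sent.toList || PySem.Chars.isIn ".com".toList sent.toList ||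
           PySem.Chars.isIn "contact".toList sent.toList || PySem.Chars.isIn "loading".toList sent.toList) = true
      · rw [if_pos hW, if_pos (show (sent.toList.any pvForbid ||
            (PySem.Chars.isIn "log".toList sent.toList || PySem.Chars.isIn "comment".toList sent.toList ||
             PySem.Chars.isIn "http".toList sent.toList || PySem.Chars.isIn ".com".toList sent.toList ||
             PySem.Chars.isIn "contact".toList sent.toList || PySem.Chars.isIn "loading".toList sent.toList)) = true
            from by simp only [hW, Bool.or_true])]
        split_ifs <;> rfl
      · rw [if_neg hW, if_neg (show ¬ (sent.toList.any pvForbid ||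
            (PySem.Chars.isIn "log".toList sent.toList || PySem.Chars.isIn "comment".toList sent.toList ||
             PySem.Chars.isIn "http".toList sent.toList || PySem.Chars.isIn ".com".toList sent.toList ||
             PySem.Chars.isIn "contact".toList sent.toList || PySem.Chars.isIn "loading".toList sent.toList)) = true
            from by
            have h1 := Bool.eq_false_iff.mpr hF
            have h2 := Bool.eq_false_iff.mpr hW
            simp only [h1, h2]
            decide)]
        have hlen : sent.toList.length = sent.length := by simp
        by_cases hR : (3 : Int) * (sent.toList.countP pvCounted : Int) > (sent.toList.length : Int)
        · rw [if_pos hR]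
          have hR' : (sent.length : Int) < 3 * (sent.toList.countP pvCounted : Int) := by omega
          simp [hR']
        · rw [if_neg hR]
          have hR' : ¬ ((sent.length : Int) < 3 * (sent.toList.countP pvCounted : Int)) := by omega
          simp [hR']
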